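-- pv_equiv track=rewrite | github.com/matttodd/Jam | KickStart 2020/G/Problem 2/solution.py | solve_problem
-- ===== SOURCE A (Python) =====
-- def solve_problem(n, coins):
--     cur_max = 0
--     for i in range(n):
--         cur_sum = sum([coins[j][i+j] for j in range(n-i)])
--         cur_max = cur_sum if cur_sum > cur_max else cur_max
--     for i in range(n):
--         cur_sum = sum([coins[i+j][j] for j in range(n-i)])
--         cur_max = cur_sum if cur_sum > cur_max else cur_max
--     return cur_max
-- ===== SOURCE B (Python) =====
-- def solve_problem(n, coins):
--     if n <= 0:
--         return 0
--     sums = [0] * (2 * n - 1)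
--     for i in range(n):
--         for j in range(n):
--             sums[j - i + n - 1] += coins[i][j]
--     best = 0
--     for s in sums:
--         if s > best:
--             best = s
--     return best
-- ===== Notes on version B (the rewrite author's own statement) =====
-- stated objective: alternative
-- what changed: B replaces A's two diagonal-by-diagonal re-summing loops by a single sweep over all cells that accumulates each cell into a table of per-diagonal sums keyed by j-i+n-1, then takes the running max of the table with a floor of 0.
import Mathlib
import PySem

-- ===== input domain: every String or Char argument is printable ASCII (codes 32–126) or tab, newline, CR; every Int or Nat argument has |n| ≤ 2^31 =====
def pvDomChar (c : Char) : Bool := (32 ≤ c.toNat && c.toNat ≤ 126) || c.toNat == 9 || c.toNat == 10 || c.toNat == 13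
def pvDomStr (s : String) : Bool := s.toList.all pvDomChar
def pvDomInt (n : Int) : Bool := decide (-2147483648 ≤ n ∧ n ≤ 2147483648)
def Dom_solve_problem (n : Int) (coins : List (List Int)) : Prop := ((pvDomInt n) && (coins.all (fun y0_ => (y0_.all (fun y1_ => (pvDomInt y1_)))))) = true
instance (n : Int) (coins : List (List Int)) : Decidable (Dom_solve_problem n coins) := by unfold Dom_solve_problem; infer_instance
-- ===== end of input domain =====

-- B does one sweep over cells accumulating per-diagonal sums into a table keyed by j-i+n-1, then a running max with floor 0,
-- instead of A's two loops that each re-sum one diagonal per iteration (equal return value; neither mutates its arguments).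

-- ===== PORT A =====
def solve_problem (n : Int) (coins : List (List Int)) : Int :=
  let cm1 := (PySem.List.pyRange 0 n 1).foldl (fun cur_max i =>
      let cur_sum := (((PySem.List.pyRange 0 (n - i) 1).map (fun j =>
          PySem.List.pyGetD (PySem.List.pyGetD coins j []) (i + j) 0)).sum)
      if cur_sum > cur_max then cur_sum else cur_max) 0
  (PySem.List.pyRange 0 n 1).foldl (fun cur_max i =>
      let cur_sum := (((PySem.List.pyRange 0 (n - i) 1).map (fun j =>
          PySem.List.pyGetD (PySem.List.pyGetD coins (i + j) []) j 0)).sum)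
      if cur_sum > cur_max then cur_sum else cur_max) cm1

-- ===== PORT B =====
def solve_problem_alt (n : Int) (coins : List (List Int)) : Int :=
  if n ≤ 0 then 0
  else
    let sums := (PySem.List.pyRange 0 n 1).foldl (fun s i =>
        (PySem.List.pyRange 0 n 1).foldl (fun s j =>
            PySem.List.pySetD s (j - i + n - 1)
              (PySem.List.pyGetD s (j - i + n - 1) 0 +
               PySem.List.pyGetD (PySem.List.pyGetD coins i []) j 0)) s)
      (PySem.List.pyRepeat [0] (2 * n - 1))
    sums.foldl (fun best s => if s > best then s else best) 0

-- ===== PRECONDITION & SPEC =====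
-- Pre_: exactly the inputs where A returns normally — each of the first n rows exists and has at least n entries
-- (every such cell is read by A); for n ≤ 0 both loops are empty and A returns 0.
def Pre_solve_problem (n : Int) (coins : List (List Int)) : Prop :=
  n ≤ (coins.length : Int) ∧ ∀ row ∈ coins.take n.toNat, n ≤ (row.length : Int)
instance (n : Int) (coins : List (List Int)) : Decidable (Pre_solve_problem n coins) := by
  unfold Pre_solve_problem; infer_instance
def pvWitness_solve_problem : Int × List (List Int) := (2, [[1, -2], [3, 4]])

def Spec_solve_problem (n : Int) (coins : List (List Int)) (out : Int) : Prop := out = solve_problem_alt n coins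
instance (n : Int) (coins : List (List Int)) (out : Int) : Decidable (Spec_solve_problem n coins out) := by unfold Spec_solve_problem; infer_instance

-- ===== CLAIM (what is proved, stated in full; the proofs are below) =====
def Claim_equal_solve_problem : Prop := ∀ (n : Int) (coins : List (List Int)), Dom_solve_problem n coins → Pre_solve_problem n coins → Spec_solve_problem n coins (solve_problem n coins)

-- ===== LEMMAS AND PROOFS =====

-- the cell read c i j = coins[i][j], totalised with defaults (identical subterm in both ports)
def pvCell (coins : List (List Int)) (i j : Int) : Int :=
  PySem.List.pyGetD (PySem.List.pyGetD coins i []) j 0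

-- running max 'if f x > cm then f x else cm' over a list
def pvRM {α : Type} (f : α → Int) (a : Int) (l : List α) : Int :=
  l.foldl (fun cm x => if f x > cm then f x else cm) a

theorem pvRM_init_le {α : Type} (f : α → Int) (a : Int) (l : List α) : a ≤ pvRM f a l := by
  induction l generalizing a with
  | nil => simp [pvRM]
  | cons x t ih =>
    simp only [pvRM, List.foldl_cons]
    refine le_trans ?_ (ih _)
    split <;> omega

theorem pvRM_le {α : Type} (f : α → Int) (a : Int) (l : List α) :
    ∀ x ∈ l, f x ≤ pvRM f a l := by
  induction l generalizing a with
  | nil => simp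
  | cons y t ih =>
    intro x hx
    simp only [pvRM, List.foldl_cons]
    rcases List.mem_cons.mp hx with h | h
    · subst h
      refine le_trans ?_ (pvRM_init_le f _ t)
      split <;> omega
    · exact ih _ x h

theorem pvRM_cases {α : Type} (f : α → Int) (a : Int) (l : List α) :
    pvRM f a l = a ∨ ∃ x ∈ l, pvRM f a l = f x := by
  induction l generalizing a with
  | nil => left; simp [pvRM]
  | cons y t ih =>
    simp only [pvRM, List.foldl_cons]
    rcases ih (if f y > a then f y else a) with h | ⟨x, hx, h⟩
    · by_cases hy : f y > a
      · right
        refine ⟨y, List.mem_cons_self .., ?_⟩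
        rw [if_pos hy]
        rw [if_pos hy] at h
        exact h
      · left; simp only [pvRM] at h; rw [h, if_neg hy]
    · right; exact ⟨x, List.mem_cons_of_mem _ hx, h⟩

-- one accumulation step  sums[k] += v
def pvUpd (s : List Int) (p : Int × Int) : List Int :=
  PySem.List.pySetD s p.1 (PySem.List.pyGetD s p.1 0 + p.2)

theorem pvUpd_length (s : List Int) (p : Int × Int) : (pvUpd s p).length = s.length := by
  simp [pvUpd, PySem.List.length_pySetD]

theorem pvFold_upd_length (l : List (Int × Int)) (s : List Int) :
    (l.foldl pvUpd s).length = s.length := by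
  induction l generalizing s with
  | nil => rfl
  | cons p t ih => simp [List.foldl_cons, ih, pvUpd_length]

theorem pvGetD_nonneg (s : List Int) (m : Int) (hm : 0 ≤ m) :
    PySem.List.pyGetD s m 0 = s.getD m.toNat 0 := by
  calc PySem.List.pyGetD s m 0 = PySem.List.pyGetD s ((m.toNat : Nat) : Int) 0 := by
        rw [Int.toNat_of_nonneg hm]
    _ = s.getD m.toNat 0 := PySem.List.pyGetD_natCast s m.toNat 0

theorem pvGetD_setD (s : List Int) (k m v : Int) (hk0 : 0 ≤ k) (hk : k < (s.length : Int))
    (hm : 0 ≤ m) :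
    PySem.List.pyGetD (PySem.List.pySetD s k v) m 0 =
      if m = k then v else PySem.List.pyGetD s m 0 := by
  rw [PySem.List.pySetD_of_nonneg s v hk0]
  rw [pvGetD_nonneg _ _ hm, pvGetD_nonneg _ _ hm]
  · rw [List.getD_eq_getElem?_getD, List.getD_eq_getElem?_getD, List.getElem?_set]
    by_cases h : m = k
    · subst h
      simp [show m.toNat < s.length by omega]
    · rw [if_neg (by omega), if_neg h]

-- invariant of the accumulation loop: the table entry at m is the initial entry plus all matching values
theorem pvFold_upd_getD (l : List (Int × Int)) (s : List Int)
    (hk : ∀ p ∈ l, 0 ≤ p.1 ∧ p.1 < (s.length : Int)) (m : Int) (hm : 0 ≤ m) :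
    PySem.List.pyGetD (l.foldl pvUpd s) m 0 =
      PySem.List.pyGetD s m 0 + (l.map (fun p => if p.1 = m then p.2 else 0)).sum := by
  induction l generalizing s with
  | nil => simp
  | cons p t ih =>
    simp only [List.foldl_cons, List.map_cons, List.sum_cons]
    have hp := hk p (List.mem_cons_self ..)
    have hlen : ((pvUpd s p).length : Int) = (s.length : Int) := by
      simp [pvUpd_length]
    rw [ih (pvUpd s p) (fun q hq => by rw [hlen]; exact hk q (List.mem_cons_of_mem _ hq)) ]
    unfold pvUpd
    rw [pvGetD_setD s p.1 m _ hp.1 hp.2 hm]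
    by_cases h : p.1 = m
    · subst h
      rw [if_pos rfl, if_pos rfl]
      ring
    · rw [if_neg (by omega), if_neg h]
      ring

-- sum of an indicator over range
theorem pvSum_ite_range (N : Nat) (t : Int) (f : Int → Int) :
    ((List.range N).map (fun (k : Nat) => if (k : Int) = t then f (k : Int) else 0)).sum =
      if 0 ≤ t ∧ t < (N : Int) then f t else 0 := by
  induction N with
  | zero => simp
  | succ N ih =>
    rw [List.range_succ, List.map_append, List.sum_append, ih]
    simp only [List.map_cons, List.map_nil, List.sum_cons, List.sum_nil]
    by_cases h : (N : Int) = t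
    · subst h
      split_ifs
      all_goals (try (exfalso; omega))
      all_goals ring
    · rw [if_neg h]
      split_ifs
      all_goals (try (exfalso; omega))
      all_goals ring

theorem pvSum_flatMap {α : Type} (f : α → List Int) (l : List α) :
    (l.flatMap f).sum = (l.map (fun x => (f x).sum)).sum := by
  induction l with
  | nil => rfl
  | cons x t ih => simp [List.flatMap_cons, List.sum_append, ih]

-- ===== the three shapes of sums =====
def pvU (n : Int) (coins : List (List Int)) (i : Int) : Int :=
  ((PySem.List.pyRange 0 (n - i) 1).map (fun j => pvCell coins j (i + j))).sum
def pvL (n : Int) (coins : List (List Int)) (i : Int) : Int :=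
  ((PySem.List.pyRange 0 (n - i) 1).map (fun j => pvCell coins (i + j) j)).sum
def pvD (n : Int) (coins : List (List Int)) (m : Int) : Int :=
  ((PySem.List.pyRange 0 n 1).map (fun i =>
    if 0 ≤ m + 1 - n + i ∧ m + 1 - n + i < n then pvCell coins i (m + 1 - n + i) else 0)).sum

def pvPairs (n : Int) (coins : List (List Int)) : List (Int × Int) :=
  (PySem.List.pyRange 0 n 1).flatMap (fun i =>
    (PySem.List.pyRange 0 n 1).map (fun j => (j - i + n - 1, pvCell coins i j)))

theorem pvPairs_key_bound (n : Int) (coins : List (List Int)) :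
    ∀ p ∈ pvPairs n coins, 0 ≤ p.1 ∧ p.1 < 2 * n - 1 := by
  intro p hp
  simp only [pvPairs, List.mem_flatMap, List.mem_map] at hp
  obtain ⟨i, hi, j, hj, rfl⟩ := hp
  rw [PySem.List.mem_pyRange_one] at hi hj
  constructor <;> simp <;> omega

theorem pvPairs_sum (n : Int) (coins : List (List Int)) (m : Int) :
    ((pvPairs n coins).map (fun p => if p.1 = m then p.2 else 0)).sum = pvD n coins m := by
  unfold pvPairs pvD
  rw [List.map_flatMap, pvSum_flatMap]
  congr 1
  apply List.map_congr_left
  intro i hi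
  rw [List.map_map]
  have : ∀ j : Int,
      ((fun p : Int × Int => if p.1 = m then p.2 else 0) ∘
        (fun j => (j - i + n - 1, pvCell coins i j))) j
      = (fun j => if j = m + 1 - n + i then pvCell coins i j else 0) j := by
    intro j
    simp only [Function.comp]
    exact if_congr (by omega) rfl rfl
  rw [List.map_congr_left (fun j _ => this j)]
  rw [PySem.List.pyRange_one 0 n]
  rw [List.map_map]
  have h2 : ∀ k ∈ List.range (n - 0).toNat,
      ((fun j => if j = m + 1 - n + i then pvCell coins i j else 0) ∘ (fun k : Nat => (0 : Int) + k)) k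
      = (fun k : Nat => if (k : Int) = m + 1 - n + i then pvCell coins i ((k : Int)) else 0) k := by
    intro k _; simp [Function.comp]
  rw [List.map_congr_left h2]
  rw [pvSum_ite_range ((n - 0).toNat) (m + 1 - n + i) (fun x => pvCell coins i x)]
  by_cases h : 0 ≤ m + 1 - n + i ∧ m + 1 - n + i < n
  · rw [if_pos ⟨h.1, by omega⟩, if_pos h]
  · rw [if_neg (by omega), if_neg h]

-- pvD equals A's diagonal sums
theorem pvSum_range_split (N M : Nat) (h : M ≤ N) (f : Nat → Int)
    (hz : ∀ k : Nat, M ≤ k → k < N → f k = 0) :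
    ((List.range N).map f).sum = ((List.range M).map f).sum := by
  have : N = M + (N - M) := by omega
  rw [this, List.range_add, List.map_append, List.sum_append, List.map_map]
  have : ∀ k ∈ List.range (N - M), (f ∘ (fun x => M + x)) k = 0 := by
    intro k hk
    rw [List.mem_range] at hk
    show f (M + k) = 0
    exact hz (M + k) (by omega) (by omega)
  rw [List.map_congr_left this]
  simp

theorem pvD_eq_U (n : Int) (coins : List (List Int)) (d : Int) (h0 : 0 ≤ d) (h1 : d < n) :
    pvD n coins (d + n - 1) = pvU n coins d := by
  unfold pvD pvU
  rw [PySem.List.pyRange_one 0 n, PySem.List.pyRange_one 0 (n - d), List.map_map, List.map_map]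
  simp only [Int.sub_zero]
  have key : ∀ k : Nat, ((fun i => if 0 ≤ (d + n - 1) + 1 - n + i ∧ (d + n - 1) + 1 - n + i < n
        then pvCell coins i ((d + n - 1) + 1 - n + i) else 0) ∘ (fun k : Nat => (0 : Int) + k)) k
      = (fun k : Nat => if (k : Int) + d < n then pvCell coins (k : Int) ((k : Int) + d) else 0) k := by
    intro k
    simp only [Function.comp]
    rw [show (0 : Int) + (k : Int) = (k : Int) by ring]
    have : (d + n - 1) + 1 - n + (k : Int) = (k : Int) + d := by ring
    rw [this]
    exact if_congr (by omega) rfl rfl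
  rw [List.map_congr_left (fun k _ => key k)]
  rw [pvSum_range_split n.toNat (n - d).toNat (by omega) _
    (fun k hk1 hk2 => by rw [if_neg (by omega)])]
  congr 1
  apply List.map_congr_left
  intro k hk
  rw [List.mem_range] at hk
  show (if (k : Int) + d < n then pvCell coins (k : Int) ((k : Int) + d) else 0)
      = pvCell coins ((0 : Int) + k) (d + ((0 : Int) + k))
  rw [if_pos (by omega)]
  congr 1 <;> ring

theorem pvD_eq_L (n : Int) (coins : List (List Int)) (d : Int) (h0 : 0 < d) (h1 : d < n) :
    pvD n coins (n - 1 - d) = pvL n coins d := by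
  unfold pvD pvL
  rw [PySem.List.pyRange_one 0 n, PySem.List.pyRange_one 0 (n - d), List.map_map, List.map_map]
  simp only [Int.sub_zero]
  have key : ∀ k ∈ List.range n.toNat, ((fun i => if 0 ≤ (n - 1 - d) + 1 - n + i ∧ (n - 1 - d) + 1 - n + i < n
        then pvCell coins i ((n - 1 - d) + 1 - n + i) else 0) ∘ (fun k : Nat => (0 : Int) + k)) k
      = (fun k : Nat => if d ≤ (k : Int) ∧ (k : Int) < n then pvCell coins (k : Int) ((k : Int) - d) else 0) k := by
    intro k hk
    rw [List.mem_range] at hk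
    simp only [Function.comp]
    rw [show (0 : Int) + (k : Int) = (k : Int) by ring]
    have : (n - 1 - d) + 1 - n + (k : Int) = (k : Int) - d := by ring
    rw [this]
    exact if_congr (by omega) rfl rfl
  rw [List.map_congr_left key]
  -- split range n.toNat at d.toNat: first part zero, second part shifts
  have hsplit : n.toNat = d.toNat + (n - d).toNat := by omega
  rw [hsplit, List.range_add, List.map_append, List.sum_append, List.map_map]
  have hz : ∀ k ∈ List.range d.toNat,
      (fun k : Nat => if d ≤ (k : Int) ∧ (k : Int) < n then pvCell coins (k : Int) ((k : Int) - d) else 0) k = 0 := by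
    intro k hk
    rw [List.mem_range] at hk
    exact if_neg (by omega)
  rw [List.map_congr_left hz]
  have hzero : (List.map (fun (_ : Nat) => (0 : Int)) (List.range d.toNat)).sum = 0 := by simp
  rw [hzero, zero_add]
  have hshift : ∀ k ∈ List.range (n - d).toNat,
      ((fun k : Nat => if d ≤ (k : Int) ∧ (k : Int) < n then pvCell coins (k : Int) ((k : Int) - d) else 0) ∘
        (fun x => d.toNat + x)) k
      = (fun k : Nat => pvCell coins (d + (k : Int)) ((k : Int))) k := by
    intro k hk
    rw [List.mem_range] at hk
    show (if d ≤ ((d.toNat + k : Nat) : Int) ∧ ((d.toNat + k : Nat) : Int) < n then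
        pvCell coins ((d.toNat + k : Nat) : Int) (((d.toNat + k : Nat) : Int) - d) else 0)
      = pvCell coins (d + (k : Int)) ((k : Int))
    rw [if_pos (by constructor <;> push_cast <;> omega)]
    congr 1 <;> push_cast <;> omega
  rw [List.map_congr_left hshift]
  congr 1
  apply List.map_congr_left
  intro k _
  show pvCell coins (d + (k : Int)) ((k : Int)) = pvCell coins (d + ((0 : Int) + k)) ((0 : Int) + k)
  norm_num

-- ===== final characterisations =====

theorem solve_problem_eq (n : Int) (coins : List (List Int)) :
    solve_problem n coins =
      pvRM (pvL n coins) (pvRM (pvU n coins) 0 (PySem.List.pyRange 0 n 1)) (PySem.List.pyRange 0 n 1) := by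
  rfl

def pvSums (n : Int) (coins : List (List Int)) : List Int :=
  (PySem.List.pyRange 0 n 1).foldl (fun s i =>
      (PySem.List.pyRange 0 n 1).foldl (fun s j =>
          PySem.List.pySetD s (j - i + n - 1)
            (PySem.List.pyGetD s (j - i + n - 1) 0 +
             PySem.List.pyGetD (PySem.List.pyGetD coins i []) j 0)) s)
    (PySem.List.pyRepeat [0] (2 * n - 1))

theorem pvSums_eq_fold (n : Int) (coins : List (List Int)) :
    pvSums n coins = (pvPairs n coins).foldl pvUpd (List.replicate (2 * n - 1).toNat 0) := by
  unfold pvSums pvPairs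
  rw [List.foldl_flatMap, ← PySem.List.pyRepeat_singleton]
  congr 1
  funext s i
  rw [List.foldl_map]
  rfl

theorem pvSums_length (n : Int) (coins : List (List Int)) :
    (pvSums n coins).length = (2 * n - 1).toNat := by
  rw [pvSums_eq_fold, pvFold_upd_length, List.length_replicate]

theorem pvSums_getD (n : Int) (coins : List (List Int)) (m : Int)
    (hm0 : 0 ≤ m) (hm1 : m < 2 * n - 1) :
    PySem.List.pyGetD (pvSums n coins) m 0 = pvD n coins m := by
  rw [pvSums_eq_fold, pvFold_upd_getD _ _ ?_ m hm0]
  · rw [pvPairs_sum]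
    rw [pvGetD_nonneg _ _ hm0, List.getD_eq_getElem?_getD, List.getElem?_replicate]
    rw [if_pos (by omega)]
    simp
  · intro p hp
    have := pvPairs_key_bound n coins p hp
    rw [List.length_replicate]
    omega

-- ===== VERDICT (by name: the statement is the Claim_ definition above) =====
theorem solve_problem_spec : Claim_equal_solve_problem := by
  intro n coins _ _
  unfold Spec_solve_problem
  rw [solve_problem_eq]
  by_cases hn : n ≤ 0
  · unfold solve_problem_alt
    rw [if_pos hn]
    rw [PySem.List.pyRange_one_eq_nil (by omega)]
    simp [pvRM]
  · have hBdef : solve_problem_alt n coins = pvRM (fun x => x) 0 (pvSums n coins) := by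
      unfold solve_problem_alt pvSums pvRM
      rw [if_neg hn]
    rw [hBdef]
    have hlen := pvSums_length n coins
    set sums := pvSums n coins with hsums
    set Aval := pvRM (pvL n coins) (pvRM (pvU n coins) 0 (PySem.List.pyRange 0 n 1)) (PySem.List.pyRange 0 n 1) with hA
    set Bval := pvRM (fun x => x) 0 sums with hBv
    have hmemD : ∀ m : Int, 0 ≤ m → m < 2 * n - 1 → pvD n coins m ∈ sums := by
      intro m h0 h1
      rw [← pvSums_getD n coins m h0 h1]
      apply PySem.List.pyGetD_mem
      unfold PySem.Raise.InRange
      rw [hlen]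
      constructor <;> omega
    have hU_le_B : ∀ i : Int, 0 ≤ i → i < n → pvU n coins i ≤ Bval := by
      intro i h0 h1
      have := hmemD (i + n - 1) (by omega) (by omega)
      rw [pvD_eq_U n coins i h0 h1] at this
      exact pvRM_le (fun x => x) 0 sums _ this
    have hL_le_B : ∀ i : Int, 0 ≤ i → i < n → pvL n coins i ≤ Bval := by
      intro i h0 h1
      by_cases hi : i = 0
      · subst hi
        have : pvL n coins 0 = pvU n coins 0 := by
          unfold pvL pvU
          apply congrArg
          apply List.map_congr_left
          intro j _
          simp [pvCell]
        rw [this]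
        exact hU_le_B 0 le_rfl (by omega)
      · have := hmemD (n - 1 - i) (by omega) (by omega)
        rw [pvD_eq_L n coins i (by omega) h1] at this
        exact pvRM_le (fun x => x) 0 sums _ this
    have hAleB : Aval ≤ Bval := by
      rcases pvRM_cases (pvL n coins) _ (PySem.List.pyRange 0 n 1) with h | ⟨x, hx, h⟩
      · rw [hA, h]
        rcases pvRM_cases (pvU n coins) 0 (PySem.List.pyRange 0 n 1) with h2 | ⟨y, hy, h2⟩
        · rw [h2]; exact pvRM_init_le _ 0 sums
        · rw [h2]
          rw [PySem.List.mem_pyRange_one] at hy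
          exact hU_le_B y hy.1 hy.2
      · rw [hA, h]
        rw [PySem.List.mem_pyRange_one] at hx
        exact hL_le_B x hx.1 hx.2
    have hBleA : Bval ≤ Aval := by
      have h0A : (0 : Int) ≤ Aval := by
        refine le_trans ?_ (pvRM_init_le (pvL n coins) _ _)
        exact pvRM_init_le (pvU n coins) 0 _
      rcases pvRM_cases (fun x => x) 0 sums with h | ⟨x, hx, h⟩
      · rw [hBv, h]; exact h0A
      · rw [hBv, h]
        obtain ⟨k, hk, hke⟩ := List.mem_iff_getElem.mp hx
        have hkx : x = PySem.List.pyGetD sums (k : Int) 0 := by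
          rw [pvGetD_nonneg _ _ (by omega), Int.toNat_natCast, List.getD_eq_getElem?_getD,
            List.getElem?_eq_getElem hk, hke]
          rfl
        have hkb : (k : Int) < 2 * n - 1 := by
          rw [hlen] at hk
          omega
        rw [hkx, hsums, pvSums_getD n coins (k : Int) (by omega) hkb]
        by_cases hd : (n : Int) - 1 ≤ (k : Int)
        · rw [show (k : Int) = ((k : Int) - (n - 1)) + n - 1 by ring,
            pvD_eq_U n coins _ (by omega) (by omega)]
          have h1 : pvU n coins ((k : Int) - (n - 1)) ≤ pvRM (pvU n coins) 0 (PySem.List.pyRange 0 n 1) := by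
            apply pvRM_le
            rw [PySem.List.mem_pyRange_one]
            omega
          exact le_trans h1 (pvRM_init_le _ _ _)
        · rw [show (k : Int) = n - 1 - (n - 1 - (k : Int)) by ring,
            pvD_eq_L n coins _ (by omega) (by omega)]
          apply pvRM_le
          rw [PySem.List.mem_pyRange_one]
          omega
    omega
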